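-- pv_equiv track=rewrite | github.com/JoonHyeok-hozy-Kim/algorithm_study | BaekJoon/Solutions/Week9/py/Sol_04_221123_14611.py | exists_invincible_road
-- ===== SOURCE A (Python) =====
-- from collections import deque
--
-- X = [-1, 1, 0, 0]
--
-- Y = [0, 0, -1, 1]
--
-- def exists_invincible_road(N, M, B):
--     visited = [[None] * (M+1) for _ in range(N+1)]
--     Q = deque()
--     Q.append([1, 1])
--     while Q:
--         i, j = Q.popleft()
--         if i == N and j == M:
--             return True
--
--         visited[i][j] = 1
--         for k in range(4):
--             x, y = i+X[k], j+Y[k]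
--             if 1 <= x <= M and 1 <= y <= N:
--                 if visited[x][y] is None and B[x][y] == -1:
--                     Q.append([x, y])
--
--     return False
-- ===== SOURCE B (Python) =====
-- def exists_invincible_road(N, M, B):
--     visited = [[None] * (M + 1) for _ in range(N + 1)]
--
--     def dfs(i, j):
--         if i == N and j == M:
--             return True
--         visited[i][j] = 1
--         for x, y in ((i - 1, j), (i + 1, j), (i, j - 1), (i, j + 1)):
--             if 1 <= x <= M and 1 <= y <= N and visited[x][y] is None and B[x][y] == -1:
--                 if dfs(x, y):
--                     return True
--         return False
--
--     return dfs(1, 1)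
-- ===== Notes on version B (the rewrite author's own statement) =====
-- stated objective: alternative
-- what changed: Replaces the iterative deque-BFS worklist with a recursive DFS flood-fill: a helper dfs(i,j) that checks the target, marks the shared visited matrix and recurses into the four eligible neighbours, returning as soon as any branch reaches the target.
import Mathlib
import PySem

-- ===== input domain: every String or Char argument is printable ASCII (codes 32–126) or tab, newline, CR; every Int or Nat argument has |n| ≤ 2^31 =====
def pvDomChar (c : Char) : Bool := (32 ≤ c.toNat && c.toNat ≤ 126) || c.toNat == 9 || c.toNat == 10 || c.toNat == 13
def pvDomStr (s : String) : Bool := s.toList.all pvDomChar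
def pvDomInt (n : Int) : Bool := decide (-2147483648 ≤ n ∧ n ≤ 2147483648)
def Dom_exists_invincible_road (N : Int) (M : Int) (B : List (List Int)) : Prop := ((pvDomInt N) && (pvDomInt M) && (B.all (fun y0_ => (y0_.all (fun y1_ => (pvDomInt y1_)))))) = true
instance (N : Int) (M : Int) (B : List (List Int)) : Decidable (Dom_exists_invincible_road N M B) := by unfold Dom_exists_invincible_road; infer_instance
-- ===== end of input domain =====

-- B replaces A's iterative deque BFS by a recursive DFS flood-fill (alternative decomposition,
-- same results on Pre_); in both ports the Python visited matrix is represented as the list of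
-- marked coordinates, which is exact on Pre_ inputs where every access is in range.


-- ===== PORT A =====
-- shared helpers: the four neighbours in A's X/Y order, B[x][y] as an Option, A's bounds check
def pvNbrs (c : Int × Int) : List (Int × Int) :=
  [(c.1 - 1, c.2), (c.1 + 1, c.2), (c.1, c.2 - 1), (c.1, c.2 + 1)]

def pvGetB (B : List (List Int)) (c : Int × Int) : Option Int :=
  (PySem.List.pyGet? B c.1).bind (fun row => PySem.List.pyGet? row c.2)

def pvInGrid (N M : Int) (c : Int × Int) : Bool :=
  decide (1 ≤ c.1 ∧ c.1 ≤ M ∧ 1 ≤ c.2 ∧ c.2 ≤ N)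

-- visited[i][j] = 1 (matrix as coordinate set)
def pvMark (V : List (Int × Int)) (c : Int × Int) : List (Int × Int) :=
  if c ∈ V then V else V ++ [c]

-- the cells appended by A's inner k-loop, in order
def pvApp (N M : Int) (B : List (List Int)) (V : List (Int × Int)) (c : Int × Int) : List (Int × Int) :=
  (pvNbrs c).filter (fun n => pvInGrid N M n && !decide (n ∈ V) && decide (pvGetB B n = some (-1)))

-- termination measure ingredients (used only to justify that the loops stop)
def pvGridCells (N M : Int) : List (Int × Int) :=
  (PySem.List.pyRange 1 (M + 1) 1).flatMap
    (fun x => (PySem.List.pyRange 1 (N + 1) 1).map (fun y => ((x, y) : Int × Int)))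

def pvU (N M : Int) (V : List (Int × Int)) : Nat :=
  (pvGridCells N M).countP (fun d => !decide (d ∈ V))

def pvRel (N M : Int) (V : List (Int × Int)) : (Int × Int) → Bool :=
  fun d => pvInGrid N M d && !decide (d ∈ V)

def pvPos (N M : Int) (V Q : List (Int × Int)) : Nat :=
  Q.findIdx (pvRel N M V)

-- termination lemmas, cited by pvBfs / pvSat in their decreasing_by
theorem pv_countP_lt {α : Type} (l : List α) (p q : α → Bool)
    (himp : ∀ a ∈ l, p a = true → q a = true) (c : α) (hc : c ∈ l)
    (hp : p c = false) (hq : q c = true) : l.countP p < l.countP q := by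
  induction l with
  | nil => cases hc
  | cons a t ih =>
    have himpt : ∀ a ∈ t, p a = true → q a = true :=
      fun x hx h => himp x (List.mem_cons_of_mem _ hx) h
    rcases List.mem_cons.mp hc with rfl | hct
    · have hle : t.countP p ≤ t.countP q := List.countP_mono_left himpt
      simp only [List.countP_cons, hp, hq]
      simp
      omega
    · have hlt := ih himpt hct
      have hstep : (if p a then 1 else 0) ≤ (if q a then 1 else 0) := by
        by_cases h : p a = true
        · have := himp a (List.mem_cons_self ..) h
          simp [h, this]
        · simp [Bool.not_eq_true] at h
          simp [h]
      simp only [List.countP_cons]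
      omega

theorem pv_mem_gridCells (N M : Int) (c : Int × Int) :
    c ∈ pvGridCells N M ↔ pvInGrid N M c = true := by
  obtain ⟨cx, cy⟩ := c
  simp only [pvGridCells, List.mem_flatMap, List.mem_map, PySem.List.mem_pyRange_one,
    pvInGrid, Prod.mk.injEq, decide_eq_true_eq]
  constructor
  · rintro ⟨x, hx, y, hy, rfl, rfl⟩
    omega
  · rintro ⟨h1, h2, h3, h4⟩
    exact ⟨cx, by omega, cy, by omega, rfl, rfl⟩

theorem pvU_lt (N M : Int) (W : List (Int × Int)) (c : Int × Int)
    (hin : pvInGrid N M c = true) (hnc : c ∉ W) :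
    pvU N M (W ++ [c]) < pvU N M W := by
  unfold pvU
  refine pv_countP_lt _ _ _ ?_ c ((pv_mem_gridCells N M c).mpr hin) ?_ ?_
  · intro a _ h
    simp only [Bool.not_eq_true', decide_eq_false_iff_not] at h ⊢
    exact fun haW => h (List.mem_append_left _ haW)
  · simp
  · simp [hnc]

theorem pvRel_false_parts (N M : Int) (V : List (Int × Int)) (c : Int × Int)
    (h : pvRel N M V c = false) (hcV : c ∉ V) : pvInGrid N M c = false := by
  unfold pvRel at h
  simpa [hcV] using h

theorem pvRel_mark (N M : Int) (V : List (Int × Int)) (c : Int × Int)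
    (h : pvRel N M V c = false) : pvRel N M (pvMark V c) = pvRel N M V := by
  funext d
  unfold pvMark
  by_cases hcV : c ∈ V
  · simp [hcV]
  · have hg := pvRel_false_parts N M V c h hcV
    simp only [if_neg hcV]
    by_cases hdc : d = c
    · subst hdc
      unfold pvRel
      simp [hg]
    · unfold pvRel
      simp [List.mem_append, hdc]

theorem pvU_mark_eq (N M : Int) (V : List (Int × Int)) (c : Int × Int)
    (h : pvRel N M V c = false) : pvU N M (pvMark V c) = pvU N M V := by
  unfold pvMark
  by_cases hcV : c ∈ V
  · simp [hcV]
  · have hg := pvRel_false_parts N M V c h hcV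
    simp only [if_neg hcV]
    unfold pvU
    apply List.countP_congr
    intro d hd
    have hdg : pvInGrid N M d = true := (pv_mem_gridCells N M d).mp hd
    have hdc : d ≠ c := by
      intro he
      rw [he, hg] at hdg
      cases hdg
    simp [List.mem_append, hdc]

theorem pv_findIdx_lt {α : Type} (p : α → Bool) (rest app : List α)
    (happ : ∀ a ∈ app, p a = true) :
    List.findIdx p (rest ++ app) < List.findIdx p rest + 1 := by
  induction rest with
  | nil =>
    simp only [List.nil_append, List.findIdx_nil]
    cases app with
    | nil => simp [List.findIdx_nil]
    | cons a t =>
      rw [List.findIdx_cons]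
      simp [happ a (List.mem_cons_self ..)]
  | cons r rs ih =>
    rw [List.cons_append, List.findIdx_cons, List.findIdx_cons]
    cases hpr : p r
    · simpa using ih
    · simp

theorem pvBfs_dec (N M : Int) (B : List (List Int)) (V : List (Int × Int))
    (c : Int × Int) (rest : List (Int × Int)) :
    Prod.Lex (· < ·) (· < ·)
      (pvU N M (pvMark V c), pvPos N M (pvMark V c) (rest ++ pvApp N M B (pvMark V c) c))
      (pvU N M V, pvPos N M V (c :: rest)) := by
  by_cases h1 : pvRel N M V c = true
  · have h1' := h1
    unfold pvRel at h1'
    rw [Bool.and_eq_true] at h1'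
    have hg : pvInGrid N M c = true := h1'.1
    have hc : c ∉ V := by simpa using h1'.2
    have hmark : pvMark V c = V ++ [c] := by unfold pvMark; simp [hc]
    rw [hmark]
    exact Prod.Lex.left _ _ (by rw [← hmark]; rw [hmark]; exact pvU_lt N M V c hg hc)
  · have h1' : pvRel N M V c = false := by simpa using h1
    rw [pvU_mark_eq N M V c h1']
    apply Prod.Lex.right
    unfold pvPos
    rw [pvRel_mark N M V c h1']
    rw [List.findIdx_cons]
    simp only [h1', cond_false]
    apply pv_findIdx_lt
    intro a ha
    unfold pvApp at ha
    obtain ⟨-, hpred⟩ := List.mem_filter.mp ha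
    simp only [Bool.and_eq_true] at hpred
    rw [← pvRel_mark N M V c h1']
    unfold pvRel
    simp [hpred.1.1, hpred.1.2]

-- A's BFS loop: pop the front, return True at the target, mark visited, append eligible neighbours
def pvBfs (N M : Int) (B : List (List Int)) (V Q : List (Int × Int)) : Bool :=
  match Q with
  | [] => false
  | c :: rest =>
    if c.1 = N ∧ c.2 = M then true
    else pvBfs N M B (pvMark V c) (rest ++ pvApp N M B (pvMark V c) c)
termination_by (pvU N M V, pvPos N M V Q)
decreasing_by exact pvBfs_dec N M B V c rest

def exists_invincible_road (N : Int) (M : Int) (B : List (List Int)) : Bool :=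
  pvBfs N M B [] [(1, 1)]

-- ===== PORT B =====
-- eligibility of a neighbour: A's bounds check, unvisited, B-value -1
def pvCand (N M : Int) (B : List (List Int)) (V : List (Int × Int)) (n : Int × Int) : Bool :=
  pvInGrid N M n && !decide (n ∈ V) && decide (pvGetB B n = some (-1))

-- the recursive dfs (pvDfs) and its for-loop over the four neighbours (pvLoop), threading the
-- visited set; the Nat argument is a fuel bound on the recursion DEPTH only (the proofs below
-- show the initial fuel is never exhausted, so this guard is inert)
mutual
def pvDfs (N M : Int) (B : List (List Int)) : Nat → (Int × Int) → List (Int × Int) → Bool × List (Int × Int)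
  | 0, _, V => (false, V)
  | f + 1, c, V =>
    if c.1 = N ∧ c.2 = M then (true, V)
    else pvLoop N M B f (pvNbrs c) (pvMark V c)
termination_by f c V => (f, 0)

def pvLoop (N M : Int) (B : List (List Int)) : Nat → List (Int × Int) → List (Int × Int) → Bool × List (Int × Int)
  | _, [], V => (false, V)
  | f, n :: ns, V =>
    if pvCand N M B V n then
      match pvDfs N M B f n V with
      | (true, W) => (true, W)
      | (false, W) => pvLoop N M B f ns W
    else pvLoop N M B f ns V
termination_by f ns V => (f, ns.length + 1)
end

def exists_invincible_road_alt (N : Int) (M : Int) (B : List (List Int)) : Bool :=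
  (pvDfs N M B ((pvGridCells N M).length + 1) (1, 1) []).1

-- ===== PRECONDITION & SPEC =====
-- Pre_ helpers (a generic transitive-closure over the input grid; neither port computes one):
-- a coordinate is index-safe when visited[x][y] (an (N+1)x(M+1) matrix) and B[x][y] are both in range
def pvIdxSafe (N M : Int) (B : List (List Int)) (n : Int × Int) : Bool :=
  decide (n.1 ≤ N) && decide (n.2 ≤ M) && !decide (pvGetB B n = none)

-- a cell is bad when one of its neighbours passes A's bounds check but is not index-safe
def pvBad (N M : Int) (B : List (List Int)) (c : Int × Int) : Bool :=
  (pvNbrs c).any (fun n => pvInGrid N M n && !pvIdxSafe N M B n)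

-- the candidate cells: coordinates of the -1 entries actually present in B (only such cells
-- can ever join the flood, so they are the closure's whole candidate universe)
def pvCells (B : List (List Int)) : List (Int × Int) :=
  B.zipIdx.flatMap (fun rx =>
    rx.1.zipIdx.filterMap (fun vy =>
      if vy.1 = -1 then some (((rx.2 : Int), (vy.2 : Int)) : Int × Int) else none))

-- one closure step: add every index-safe in-grid cell valued -1 adjacent to an already
-- reached cell other than the target (the target is never expanded)
def pvStepR (N M : Int) (B : List (List Int)) (R : List (Int × Int)) : List (Int × Int) :=
  R ++ (pvCells B).filter (fun n =>
    !decide (n ∈ R) && pvInGrid N M n && pvIdxSafe N M B n && decide (pvGetB B n = some (-1)) &&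
    R.any (fun c => !decide (c = ((N, M) : Int × Int)) && decide (n ∈ pvNbrs c)))

-- the -1-flood region of the input: closure of {(1,1)} under pvStepR
def pvReachL (N M : Int) (B : List (List Int)) : List (Int × Int) :=
  (pvStepR N M B)^[(pvCells B).length] [(1, 1)]

-- Pre_ excludes exactly (i) the inputs on which Python A raises IndexError — the flood region
-- (through cells valued -1, under the swapped 1<=x<=M and 1<=y<=N bounds) contains a cell with a
-- bounds-passing neighbour whose visited- or B-index is out of range, or the grid shape makes the
-- very first accesses out of range — and (ii) the corner where that same flood also reaches the
-- target, on which returning True or raising IndexError is an accident of exploration order in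
-- both A (BFS queue order) and B (DFS order), so neither value is the one to specify.
def Pre_exists_invincible_road (N : Int) (M : Int) (B : List (List Int)) : Prop :=
  (N = 1 ∧ M = 1) ∨
  (1 ≤ N ∧ 1 ≤ M ∧
    ∀ c ∈ pvReachL N M B, c ≠ ((N, M) : Int × Int) → pvBad N M B c = false)

instance (N : Int) (M : Int) (B : List (List Int)) :
    Decidable (Pre_exists_invincible_road N M B) := by
  unfold Pre_exists_invincible_road; infer_instance

def pvWitness_exists_invincible_road : Int × Int × List (List Int) :=
  (2, 2, [[0, 0, 0], [0, -1, -1], [0, 0, -1]])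

def Spec_exists_invincible_road (N : Int) (M : Int) (B : List (List Int)) (out : Bool) : Prop := out = exists_invincible_road_alt N M B
instance (N : Int) (M : Int) (B : List (List Int)) (out : Bool) : Decidable (Spec_exists_invincible_road N M B out) := by unfold Spec_exists_invincible_road; infer_instance

-- ===== CLAIM (what is proved, stated in full; the proofs are below) =====
def Claim_equal_exists_invincible_road : Prop := ∀ (N : Int) (M : Int) (B : List (List Int)), Dom_exists_invincible_road N M B → Pre_exists_invincible_road N M B → Spec_exists_invincible_road N M B (exists_invincible_road N M B)

-- ===== LEMMAS AND PROOFS =====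

-- reachability from (1,1) through in-grid cells valued -1: the common characterisation
inductive pvReach (N M : Int) (B : List (List Int)) : Int × Int → Prop
  | start : pvReach N M B (1, 1)
  | step (c n : Int × Int) : pvReach N M B c → n ∈ pvNbrs c →
      pvInGrid N M n = true → pvGetB B n = some (-1) → pvReach N M B n

theorem pvMark_mem_iff (V : List (Int × Int)) (c x : Int × Int) :
    x ∈ pvMark V c ↔ x ∈ V ∨ x = c := by
  unfold pvMark
  split
  · rename_i h
    constructor
    · exact Or.inl
    · rintro (hx | rfl)
      · exact hx
      · exact h
  · simp [List.mem_append]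

theorem pvMark_mem_self (V : List (Int × Int)) (c : Int × Int) : c ∈ pvMark V c :=
  (pvMark_mem_iff V c c).mpr (Or.inr rfl)

theorem pvMark_mono (V : List (Int × Int)) (c x : Int × Int) (h : x ∈ V) : x ∈ pvMark V c :=
  (pvMark_mem_iff V c x).mpr (Or.inl h)

-- ---- A-side: the BFS answers exactly reachability ----
def pvInvA (N M : Int) (B : List (List Int)) (V Q : List (Int × Int)) : Prop :=
  (((1, 1) : Int × Int) ∈ V ∨ ((1, 1) : Int × Int) ∈ Q) ∧
  (∀ c ∈ V, ∀ n ∈ pvNbrs c, pvInGrid N M n = true → pvGetB B n = some (-1) →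
     (n ∈ V ∨ n ∈ Q)) ∧
  ((N, M) : Int × Int) ∉ V

theorem pvBfs_true (N M : Int) (B : List (List Int)) :
    ∀ V Q, pvBfs N M B V Q = true → (∀ c ∈ Q, pvReach N M B c) →
      pvReach N M B (N, M) := by
  intro V Q
  induction V, Q using pvBfs.induct N M B with
  | case1 V =>
    intro h _
    rw [pvBfs] at h
    cases h
  | case2 V c rest hc =>
    intro _ hq
    have hr := hq c (List.mem_cons_self ..)
    have hce : c = ((N, M) : Int × Int) := Prod.ext hc.1 hc.2
    rwa [hce] at hr
  | case3 V c rest hc ih =>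
    intro h hq
    rw [pvBfs, if_neg hc] at h
    apply ih h
    intro x hx
    rcases List.mem_append.mp hx with hx | hx
    · exact hq x (List.mem_cons_of_mem _ hx)
    · unfold pvApp at hx
      obtain ⟨hmem, hpred⟩ := List.mem_filter.mp hx
      simp only [Bool.and_eq_true, decide_eq_true_eq] at hpred
      exact pvReach.step c x (hq c (List.mem_cons_self ..)) hmem hpred.1.1 hpred.2

theorem pvBfs_false (N M : Int) (B : List (List Int)) :
    ∀ V Q, pvBfs N M B V Q = false → pvInvA N M B V Q → ¬ pvReach N M B (N, M) := by
  intro V Q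
  induction V, Q using pvBfs.induct N M B with
  | case1 V =>
    intro _ hinv hreach
    obtain ⟨hstart, hclosed, htgt⟩ := hinv
    have hs : ((1, 1) : Int × Int) ∈ V := by
      rcases hstart with h | h
      · exact h
      · cases h
    have hsub : ∀ d, pvReach N M B d → d ∈ V := by
      intro d hd
      induction hd with
      | start => exact hs
      | step c n hcn hn hg hB ihd =>
        rcases hclosed c ihd n hn hg hB with h | h
        · exact h
        · cases h
    exact htgt (hsub _ hreach)
  | case2 V c rest hc =>
    intro h _
    rw [pvBfs, if_pos hc] at h
    cases h
  | case3 V c rest hc ih =>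
    intro h hinv
    rw [pvBfs, if_neg hc] at h
    apply ih h
    obtain ⟨hstart, hclosed, htgt⟩ := hinv
    refine ⟨?_, ?_, ?_⟩
    · rcases hstart with h1 | h1
      · exact Or.inl (pvMark_mono V c _ h1)
      · rcases List.mem_cons.mp h1 with he | h1
        · exact Or.inl (he ▸ pvMark_mem_self V c)
        · exact Or.inr (List.mem_append_left _ h1)
    · intro d hd n hn hg hB
      rcases (pvMark_mem_iff V c d).mp hd with hdV | rfl
      · rcases hclosed d hdV n hn hg hB with h2 | h2
        · exact Or.inl (pvMark_mono V c _ h2)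
        · rcases List.mem_cons.mp h2 with he | h2
          · exact Or.inl (he ▸ pvMark_mem_self V c)
          · exact Or.inr (List.mem_append_left _ h2)
      · by_cases hnV : n ∈ pvMark V d
        · exact Or.inl hnV
        · refine Or.inr (List.mem_append_right _ ?_)
          unfold pvApp
          refine List.mem_filter.mpr ⟨hn, ?_⟩
          simp [hg, hnV, hB]
    · intro hmem
      rcases (pvMark_mem_iff V c _).mp hmem with h2 | h2
      · exact htgt h2
      · apply hc
        rw [← h2]
        exact ⟨rfl, rfl⟩

-- ---- B-side: the DFS answers exactly reachability ----

-- every eligible neighbour of d is already in W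
def pvExpl (N M : Int) (B : List (List Int)) (W : List (Int × Int)) (d : Int × Int) : Prop :=
  ∀ n ∈ pvNbrs d, pvInGrid N M n = true → pvGetB B n = some (-1) → n ∈ W

theorem pvExpl_mono (N M : Int) (B : List (List Int)) (W W' : List (Int × Int))
    (h : ∀ x ∈ W, x ∈ W') (d : Int × Int) (hd : pvExpl N M B W d) : pvExpl N M B W' d :=
  fun n hn hg hB => h n (hd n hn hg hB)

-- recursion-depth measure: grid cells not yet visited and distinct from the current cell
def pvM (N M : Int) (c : Int × Int) (V : List (Int × Int)) : Nat :=
  (pvGridCells N M).countP (fun d => !decide (d ∈ V) && !decide (d = c))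

theorem pvM_lt (N M : Int) (c n : Int × Int) (V W : List (Int × Int))
    (hg : pvInGrid N M n = true) (hVW : ∀ x ∈ V, x ∈ W) (hcW : c ∈ W) (hnW : n ∉ W) :
    pvM N M n W < pvM N M c V := by
  refine pv_countP_lt _ _ _ ?_ n ((pv_mem_gridCells N M n).mpr hg) ?_ ?_
  · intro a _ h
    simp only [Bool.and_eq_true, Bool.not_eq_true', decide_eq_false_iff_not] at h ⊢
    refine ⟨fun haV => h.1 (hVW a haV), fun he => h.1 (he ▸ hcW)⟩
  · simp
  · have hnV : n ∉ V := fun h => hnW (hVW n h)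
    have hnc : n ≠ c := fun he => hnW (he ▸ hcW)
    simp [hnV, hnc]

theorem pvCand_parts (N M : Int) (B : List (List Int)) (V : List (Int × Int)) (n : Int × Int) :
    pvCand N M B V n = true ↔
      pvInGrid N M n = true ∧ n ∉ V ∧ pvGetB B n = some (-1) := by
  unfold pvCand
  simp [Bool.and_eq_true, and_assoc]

-- (B1) the visited set only grows
theorem pvDfs_mono (N M : Int) (B : List (List Int)) :
    ∀ f : Nat, (∀ c V x, x ∈ V → x ∈ (pvDfs N M B f c V).2) ∧
      (∀ ns V x, x ∈ V → x ∈ (pvLoop N M B f ns V).2) := by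
  intro f
  induction f with
  | zero =>
    have hd : ∀ c V x, x ∈ V → x ∈ (pvDfs N M B 0 c V).2 := by
      intro c V x hx
      rw [pvDfs]
      exact hx
    refine ⟨hd, ?_⟩
    intro ns
    induction ns with
    | nil => intro V x hx; rw [pvLoop]; exact hx
    | cons n ns ih =>
      intro V x hx
      rw [pvLoop]
      split
      · rcases h1 : pvDfs N M B 0 n V with ⟨b1, W1⟩
        have hx1 : x ∈ W1 := by
          have := hd n V x hx
          rw [h1] at this
          exact this
        cases b1
        · exact ih W1 x hx1
        · exact hx1
      · exact ih V x hx
  | succ f ihf =>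
    have hd : ∀ c V x, x ∈ V → x ∈ (pvDfs N M B (f + 1) c V).2 := by
      intro c V x hx
      rw [pvDfs]
      split
      · exact hx
      · exact ihf.2 (pvNbrs c) (pvMark V c) x (pvMark_mono V c x hx)
    refine ⟨hd, ?_⟩
    intro ns
    induction ns with
    | nil => intro V x hx; rw [pvLoop]; exact hx
    | cons n ns ih =>
      intro V x hx
      rw [pvLoop]
      split
      · rcases h1 : pvDfs N M B (f + 1) n V with ⟨b1, W1⟩
        have hx1 : x ∈ W1 := by
          have := hd n V x hx
          rw [h1] at this
          exact this
        cases b1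
        · exact ih W1 x hx1
        · exact hx1
      · exact ih V x hx

-- (B2) a True answer really found the target
theorem pvDfs_true (N M : Int) (B : List (List Int)) :
    ∀ f : Nat,
      (∀ c V, (pvDfs N M B f c V).1 = true → pvReach N M B c → pvReach N M B (N, M)) ∧
      (∀ c, pvReach N M B c → ∀ ns V, (∀ n ∈ ns, n ∈ pvNbrs c) →
        (pvLoop N M B f ns V).1 = true → pvReach N M B (N, M)) := by
  intro f
  induction f with
  | zero =>
    have hd : ∀ c V, (pvDfs N M B 0 c V).1 = true → pvReach N M B c → pvReach N M B (N, M) := by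
      intro c V h
      rw [pvDfs] at h
      simp at h
    refine ⟨hd, ?_⟩
    intro c hc ns
    induction ns with
    | nil => intro V _ h; rw [pvLoop.eq_def] at h; simp at h
    | cons n ns ih =>
      intro V hns h
      rw [pvLoop] at h
      split at h
      · rename_i hcand
        obtain ⟨hg, -, hB⟩ := (pvCand_parts N M B V n).mp hcand
        have hrn : pvReach N M B n :=
          pvReach.step c n hc (hns n (List.mem_cons_self ..)) hg hB
        rcases h1 : pvDfs N M B 0 n V with ⟨b1, W1⟩
        rw [h1] at h
        cases b1
        · exact ih W1 (fun m hm => hns m (List.mem_cons_of_mem _ hm)) h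
        · exact hd n V (by rw [h1]) hrn
      · exact ih V (fun m hm => hns m (List.mem_cons_of_mem _ hm)) h
  | succ f ihf =>
    have hd : ∀ c V, (pvDfs N M B (f + 1) c V).1 = true → pvReach N M B c →
        pvReach N M B (N, M) := by
      intro c V h hc
      rw [pvDfs] at h
      split at h
      · rename_i htg
        have : c = ((N, M) : Int × Int) := Prod.ext htg.1 htg.2
        rwa [this] at hc
      · exact ihf.2 c hc (pvNbrs c) (pvMark V c) (fun n hn => hn) h
    refine ⟨hd, ?_⟩
    intro c hc ns
    induction ns with
    | nil => intro V _ h; rw [pvLoop.eq_def] at h; simp at h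
    | cons n ns ih =>
      intro V hns h
      rw [pvLoop] at h
      split at h
      · rename_i hcand
        obtain ⟨hg, -, hB⟩ := (pvCand_parts N M B V n).mp hcand
        have hrn : pvReach N M B n :=
          pvReach.step c n hc (hns n (List.mem_cons_self ..)) hg hB
        rcases h1 : pvDfs N M B (f + 1) n V with ⟨b1, W1⟩
        rw [h1] at h
        cases b1
        · exact ih W1 (fun m hm => hns m (List.mem_cons_of_mem _ hm)) h
        · exact hd n V (by rw [h1]) hrn
      · exact ih V (fun m hm => hns m (List.mem_cons_of_mem _ hm)) h

-- (B3) a False answer leaves a closed visited set not containing the target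
theorem pvLoop_false_aux (N M : Int) (B : List (List Int)) (f : Nat)
    (hdfs : ∀ c V, pvM N M c V < f → ∀ W, pvDfs N M B f c V = (false, W) →
      c ∈ W ∧ pvExpl N M B W c ∧ (∀ d ∈ W, d ∉ V → pvExpl N M B W d) ∧
        (((N, M) : Int × Int) ∉ V → c ≠ ((N, M) : Int × Int) → ((N, M) : Int × Int) ∉ W)) :
    ∀ ns V c₀ V₀, (∀ x ∈ V₀, x ∈ V) → c₀ ∈ V → pvM N M c₀ V₀ ≤ f →
      ∀ W, pvLoop N M B f ns V = (false, W) →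
      (∀ n ∈ ns, pvInGrid N M n = true → pvGetB B n = some (-1) → n ∈ W) ∧
        (∀ d ∈ W, d ∉ V → pvExpl N M B W d) ∧
        (((N, M) : Int × Int) ∉ V → ((N, M) : Int × Int) ∉ W) := by
  intro ns
  induction ns with
  | nil =>
    intro V c₀ V₀ h₀ hc₀ hf W hW
    rw [pvLoop] at hW
    obtain rfl : V = W := congrArg Prod.snd hW
    refine ⟨?_, ?_, fun h => h⟩
    · intro n hn
      exact absurd hn (List.not_mem_nil)
    · intro d hd hdV
      exact absurd hd hdV
  | cons n ns ih =>
    intro V c₀ V₀ h₀ hc₀ hf W hW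
    rw [pvLoop] at hW
    split at hW
    · rename_i hcand
      obtain ⟨hg, hnV, hB⟩ := (pvCand_parts N M B V n).mp hcand
      have hmlt : pvM N M n V < pvM N M c₀ V₀ := pvM_lt N M c₀ n V₀ V hg h₀ hc₀ hnV
      have hmf : pvM N M n V < f := lt_of_lt_of_le hmlt hf
      rcases h1 : pvDfs N M B f n V with ⟨b1, W1⟩
      rw [h1] at hW
      cases b1
      · -- the recursion returned false; the loop continues on W1
        have hW' : pvLoop N M B f ns W1 = (false, W) := hW
        have hVW1 : ∀ x ∈ V, x ∈ W1 := by
          intro x hx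
          have := (pvDfs_mono N M B f).1 n V x hx
          rw [h1] at this
          exact this
        obtain ⟨hnW1, hexpln, hallW1, htgtW1⟩ := hdfs n V hmf W1 h1
        have hntgt : n ≠ ((N, M) : Int × Int) := by
          intro he
          cases f with
          | zero => exact absurd hmf (Nat.not_lt_zero _)
          | succ f2 =>
            rw [pvDfs] at h1
            rw [if_pos (by rw [he]; exact ⟨rfl, rfl⟩)] at h1
            exact Bool.noConfusion (congrArg Prod.fst h1)
        obtain ⟨helig, hexpl', htgt'⟩ :=
          ih W1 c₀ V₀ (fun x hx => hVW1 x (h₀ x hx)) (hVW1 c₀ hc₀) hf W hW'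
        have hW1W : ∀ x ∈ W1, x ∈ W := by
          intro x hx
          have := (pvDfs_mono N M B f).2 ns W1 x hx
          rw [hW'] at this
          exact this
        refine ⟨?_, ?_, ?_⟩
        · intro m hm hgm hBm
          rcases List.mem_cons.mp hm with rfl | hm
          · exact hW1W m hnW1
          · exact helig m hm hgm hBm
        · intro d hd hdV
          by_cases hdW1 : d ∈ W1
          · exact pvExpl_mono N M B W1 W hW1W d (hallW1 d hdW1 hdV)
          · exact hexpl' d hd hdW1
        · intro htV
          exact htgt' (htgtW1 htV hntgt)
      · have hW' : ((true, W1) : Bool × List (Int × Int)) = (false, W) := hW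
        exact Bool.noConfusion (congrArg Prod.fst hW')
    · rename_i hcand
      obtain ⟨helig, hexpl', htgt'⟩ := ih V c₀ V₀ h₀ hc₀ hf W hW
      have hVW : ∀ x ∈ V, x ∈ W := by
        intro x hx
        have := (pvDfs_mono N M B f).2 ns V x hx
        rw [hW] at this
        exact this
      refine ⟨?_, hexpl', htgt'⟩
      intro m hm hgm hBm
      rcases List.mem_cons.mp hm with rfl | hm
      · -- in grid with value -1 but not a candidate: it is already visited
        have hmV : m ∈ V := by
          by_contra hmV
          exact hcand ((pvCand_parts N M B V m).mpr ⟨hgm, hmV, hBm⟩)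
        exact hVW m hmV
      · exact helig m hm hgm hBm

theorem pvDfs_false (N M : Int) (B : List (List Int)) :
    ∀ f : Nat, ∀ c V, pvM N M c V < f → ∀ W, pvDfs N M B f c V = (false, W) →
      c ∈ W ∧ pvExpl N M B W c ∧ (∀ d ∈ W, d ∉ V → pvExpl N M B W d) ∧
        (((N, M) : Int × Int) ∉ V → c ≠ ((N, M) : Int × Int) → ((N, M) : Int × Int) ∉ W) := by
  intro f
  induction f with
  | zero => intro c V hlt; exact absurd hlt (Nat.not_lt_zero _)
  | succ f ihf =>
    intro c V hlt W hW
    rw [pvDfs] at hW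
    split at hW
    · exact Bool.noConfusion (congrArg Prod.fst hW)
    · rename_i htg
      obtain ⟨helig, hexpl', htgt'⟩ :=
        pvLoop_false_aux N M B f ihf (pvNbrs c) (pvMark V c) c V
          (fun x hx => pvMark_mono V c x hx) (pvMark_mem_self V c) (by omega) W hW
      have hV0W : ∀ x ∈ pvMark V c, x ∈ W := by
        intro x hx
        have := (pvDfs_mono N M B f).2 (pvNbrs c) (pvMark V c) x hx
        rw [hW] at this
        exact this
      have hcW : c ∈ W := hV0W c (pvMark_mem_self V c)
      have hexplc : pvExpl N M B W c := fun n hn hg hB => helig n hn hg hB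
      refine ⟨hcW, hexplc, ?_, ?_⟩
      · intro d hd hdV
        by_cases hdc : d = c
        · exact hdc ▸ hexplc
        · exact hexpl' d hd (fun h => hdc (((pvMark_mem_iff V c d).mp h).resolve_left hdV))
      · intro htV hct
        refine htgt' ?_
        intro h
        rcases (pvMark_mem_iff V c _).mp h with h | h
        · exact htV h
        · exact hct h.symm

theorem pvDfs_top_true (N M : Int) (B : List (List Int))
    (h : (pvDfs N M B ((pvGridCells N M).length + 1) (1, 1) []).1 = true) :
    pvReach N M B (N, M) :=
  (pvDfs_true N M B _).1 (1, 1) [] h pvReach.start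

theorem pvDfs_top_false (N M : Int) (B : List (List Int))
    (h : (pvDfs N M B ((pvGridCells N M).length + 1) (1, 1) []).1 = false) :
    ¬ pvReach N M B (N, M) := by
  intro hr
  rcases hD : pvDfs N M B ((pvGridCells N M).length + 1) (1, 1) [] with ⟨b, W⟩
  have hb : b = false := by rw [hD] at h; exact h
  subst hb
  have hfuel : pvM N M (1, 1) [] < (pvGridCells N M).length + 1 :=
    Nat.lt_succ_of_le List.countP_le_length
  obtain ⟨hs, hexpls, hall, htgt⟩ := pvDfs_false N M B _ (1, 1) [] hfuel W hD
  have hne : ((1, 1) : Int × Int) ≠ ((N, M) : Int × Int) := by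
    intro he
    rw [pvDfs] at hD
    rw [if_pos (by
      refine ⟨?_, ?_⟩
      · exact congrArg Prod.fst he
      · exact congrArg Prod.snd he)] at hD
    exact Bool.noConfusion (congrArg Prod.fst hD)
  have hsub : ∀ d, pvReach N M B d → d ∈ W := by
    intro d hd
    induction hd with
    | start => exact hs
    | step c n hcn hn hg hB ihd =>
      exact hall c ihd (by intro h; cases h) n hn hg hB
  exact htgt (by intro h; cases h) hne (hsub _ hr)

-- ===== VERDICT (by name: the statement is the Claim_ definition above) =====
theorem exists_invincible_road_spec : Claim_equal_exists_invincible_road := by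
  intro N M B _ _
  unfold Spec_exists_invincible_road exists_invincible_road exists_invincible_road_alt
  cases hb : pvBfs N M B [] [(1, 1)] with
  | true =>
    have hr := pvBfs_true N M B [] [(1, 1)] hb
      (by
        intro c hc
        have : c = ((1, 1) : Int × Int) := by simpa using hc
        rw [this]
        exact pvReach.start)
    cases hd : (pvDfs N M B ((pvGridCells N M).length + 1) (1, 1) []).1 with
    | true => rfl
    | false => exact absurd hr (pvDfs_top_false N M B hd)
  | false =>
    have hinv : pvInvA N M B [] [(1, 1)] := by
      refine ⟨Or.inr (List.mem_cons_self ..), ?_, ?_⟩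
      · intro c hc
        cases hc
      · simp
    have hnr := pvBfs_false N M B [] [(1, 1)] hb hinv
    cases hd : (pvDfs N M B ((pvGridCells N M).length + 1) (1, 1) []).1 with
    | true => exact absurd (pvDfs_top_true N M B hd) hnr
    | false => rfl
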